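-- pv_equiv track=rewrite | github.com/HernanPotenza/2023_2C_VSC | clase_6_14-9/biblioteca_funciones_stark.py | devuelve_cantidad_superheroe_por_color_ojos
-- ===== SOURCE A (Python) =====
-- def devuelve_cantidad_superheroe_por_color_ojos(lista_personajes: list[dict]) -> dict:
--     '''
--     Busca y devuelve la cantidad de superheroe por cada grupo de color de ojos
--     Recibe: lista de personajes
--     Devuelve: un diccionario con los colores de ojo como clave y la cantidad de superheroes como valor
--     '''
--     informe_cantidades = {}
--
--     for personaje in lista_personajes:
--         color_ojos = personaje.get('color_ojos', 'No especifica color de ojos').capitalize()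
--         if not color_ojos in informe_cantidades.keys():
--             informe_cantidades[color_ojos] = 1
--         else:
--             informe_cantidades[color_ojos] += 1
--
--     return informe_cantidades
-- ===== SOURCE B (Python) =====
-- def devuelve_cantidad_superheroe_por_color_ojos(lista_personajes: list[dict]) -> dict:
--     '''
--     Two-phase re-implementation: extract the capitalized eye-color keys once,
--     then build the result over the distinct keys (first-occurrence order) by counting.
--     '''
--     claves = [p.get('color_ojos', 'No especifica color de ojos').capitalize() for p in lista_personajes]
--     return {c: claves.count(c) for c in dict.fromkeys(claves)}
-- ===== Notes on version B (the rewrite author's own statement) =====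
-- stated objective: simpler
-- what changed: Replaces the incremental contains-then-insert/increment dict loop with a two-phase decomposition: build the list of capitalized keys once, then a dict comprehension over the deduplicated keys counting occurrences with list.count.
import Mathlib
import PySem

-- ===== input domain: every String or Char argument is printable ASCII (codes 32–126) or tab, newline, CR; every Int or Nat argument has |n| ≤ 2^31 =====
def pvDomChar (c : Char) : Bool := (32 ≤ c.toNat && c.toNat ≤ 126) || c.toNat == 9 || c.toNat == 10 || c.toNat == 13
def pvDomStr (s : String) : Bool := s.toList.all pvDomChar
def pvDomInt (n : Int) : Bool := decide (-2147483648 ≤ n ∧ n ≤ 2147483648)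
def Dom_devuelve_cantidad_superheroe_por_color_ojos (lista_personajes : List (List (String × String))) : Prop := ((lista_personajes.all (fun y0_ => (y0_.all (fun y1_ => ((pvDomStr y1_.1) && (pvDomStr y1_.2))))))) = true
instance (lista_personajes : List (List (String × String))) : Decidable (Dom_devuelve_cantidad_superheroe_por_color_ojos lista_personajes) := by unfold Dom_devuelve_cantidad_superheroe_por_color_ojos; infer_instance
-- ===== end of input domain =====

-- B replaces A's incremental contains-then-insert/increment dict loop by a two-phase
-- decomposition (key list once, then counts over the deduplicated keys); objective: simpler.

-- s.capitalize(): first char upper, rest lower — exact on the ASCII Dom (title-case = upper there)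
def pvCapitalize (s : String) : String :=
  match s.toList with
  | [] => String.mk []
  | c :: cs => String.mk (PySem.Chars.upperChar c :: cs.map PySem.Chars.lowerChar)

-- personaje.get('color_ojos', default): dict → assoc list, lookup = first match
def pvKey (p : List (String × String)) : String :=
  pvCapitalize (((p.find? (fun kv => kv.1 == "color_ojos")).map (·.2)).getD "No especifica color de ojos")

-- ===== PORT A =====
def devuelve_cantidad_superheroe_por_color_ojos (lista_personajes : List (List (String × String))) : List (String × Int) :=
  (lista_personajes.foldl
    (fun informe personaje =>
      let color_ojos := pvKey personaje
      if informe.contains color_ojos = false then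
        informe.insert color_ojos 1
      else
        informe.insert color_ojos (informe.getD color_ojos 0 + 1))
    (PySem.Dict.empty : PySem.Dict String Int)).items

-- ===== PORT B =====
def devuelve_cantidad_superheroe_por_color_ojos_alt (lista_personajes : List (List (String × String))) : List (String × Int) :=
  let claves := lista_personajes.map pvKey
  (PySem.List.dedup claves).map (fun c => (c, (PySem.List.count claves c : Int)))

-- ===== PRECONDITION & SPEC =====
def Spec_devuelve_cantidad_superheroe_por_color_ojos (lista_personajes : List (List (String × String))) (out : List (String × Int)) : Prop := out = devuelve_cantidad_superheroe_por_color_ojos_alt lista_personajes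
instance (lista_personajes : List (List (String × String))) (out : List (String × Int)) : Decidable (Spec_devuelve_cantidad_superheroe_por_color_ojos lista_personajes out) := by unfold Spec_devuelve_cantidad_superheroe_por_color_ojos; infer_instance

-- ===== CLAIM (what is proved, stated in full; the proofs are below) =====
def Claim_equal_devuelve_cantidad_superheroe_por_color_ojos : Prop := ∀ (lista_personajes : List (List (String × String))), Dom_devuelve_cantidad_superheroe_por_color_ojos lista_personajes → Spec_devuelve_cantidad_superheroe_por_color_ojos lista_personajes (devuelve_cantidad_superheroe_por_color_ojos lista_personajes)

-- ===== LEMMAS AND PROOFS =====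

-- A's two branches both amount to 'insert c (getD c 0 + 1)'
lemma pv_body_eq (informe : PySem.Dict String Int) (c : String) :
    (if informe.contains c = false then informe.insert c 1
     else informe.insert c (informe.getD c 0 + 1)) = informe.insert c (informe.getD c 0 + 1) := by
  by_cases h : informe.contains c = false
  · have h0 : informe.getD c 0 = 0 := PySem.Dict.getD_of_not_contains (d := informe) (k := c) (d0 := 0) h
    rw [h, h0]; simp
  · simp [h]

-- ===== VERDICT (by name: the statement is the Claim_ definition above) =====
theorem devuelve_cantidad_superheroe_por_color_ojos_spec : Claim_equal_devuelve_cantidad_superheroe_por_color_ojos := by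
  intro lista _
  unfold Spec_devuelve_cantidad_superheroe_por_color_ojos
  unfold devuelve_cantidad_superheroe_por_color_ojos devuelve_cantidad_superheroe_por_color_ojos_alt
  have h1 : (lista.foldl
      (fun informe personaje =>
        let c := pvKey personaje
        if informe.contains c = false then informe.insert c 1
        else informe.insert c (informe.getD c 0 + 1))
      (PySem.Dict.empty : PySem.Dict String Int))
      = (lista.map pvKey).foldl (fun d x => d.insert x (d.getD x 0 + 1)) PySem.Dict.empty := by
    rw [List.foldl_map]
    congr 1
    funext informe personaje
    exact pv_body_eq informe (pvKey personaje)
  rw [h1, PySem.Dict.foldl_insert_getD_add_one_eq_counter, PySem.Dict.items_counter]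
  simp [PySem.List.count_eq]
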